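-- pv_equiv track=rewrite | github.com/Rootless-Ghost/LogNorm | adapters/cef.py | _infer_cef_category
-- ===== SOURCE A (Python) =====
-- def _infer_cef_category(vendor: str, product: str, action: str,
--                          src_ip: str, dst_ip: str) -> tuple:
--     """Heuristic category inference for CEF/JSON records."""
--     combined = f"{vendor} {product} {action}".lower()
--     if any(k in combined for k in ("firewall", "fw", "network", "traffic",
--                                     "connection", "flow", "netflow")):
--         cat = ["network"]
--         typ = ["connection"] if (src_ip or dst_ip) else ["info"]
--     elif any(k in combined for k in ("login", "logon", "auth", "password",
--                                       "credential", "session")):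
--         cat = ["authentication"]
--         typ = ["start"]
--     elif any(k in combined for k in ("process", "execut", "spawn", "cmd",
--                                       "command", "powershell", "script")):
--         cat = ["process"]
--         typ = ["start"]
--     elif any(k in combined for k in ("file", "document", "upload", "download",
--                                       "write", "delete", "creat")):
--         cat = ["file"]
--         typ = ["change"]
--     elif any(k in combined for k in ("malware", "virus", "threat", "detect",
--                                       "intrusion", "exploit", "attack")):
--         cat = ["intrusion_detection"]
--         typ = ["info"]
--     else:
--         cat = ["network"] if (src_ip or dst_ip) else ["process"]
--         typ = ["info"]
--     return cat, typ
-- ===== SOURCE B (Python) =====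
-- # B: one flat pass over a keyword -> (priority, category) index keeping the best (lowest-priority)
-- # matching keyword, instead of the fused five-branch if/elif cascade; type is derived from the
-- # winning category afterwards.
--
-- _KW = {}
-- for _pri, (_cat, _kws) in enumerate([
--     ("network", ("firewall", "fw", "network", "traffic", "connection", "flow", "netflow")),
--     ("authentication", ("login", "logon", "auth", "password", "credential", "session")),
--     ("process", ("process", "execut", "spawn", "cmd", "command", "powershell", "script")),
--     ("file", ("file", "document", "upload", "download", "write", "delete", "creat")),
--     ("intrusion_detection", ("malware", "virus", "threat", "detect", "intrusion", "exploit", "attack")),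
-- ]):
--     for _k in _kws:
--         _KW[_k] = (_pri, _cat)
--
--
-- def _infer_cef_category(vendor: str, product: str, action: str,
--                         src_ip: str, dst_ip: str) -> tuple:
--     combined = " ".join((vendor, product, action)).lower()
--     has_ip = bool(src_ip) or bool(dst_ip)
--     best = None
--     for k, (pri, cat) in _KW.items():
--         if k in combined and (best is None or pri < best[0]):
--             best = (pri, cat)
--     if best is None:
--         return (["network"] if has_ip else ["process"]), ["info"]
--     cat = best[1]
--     if cat == "network":
--         typ = "connection" if has_ip else "info"
--     else:
--         typ = {"authentication": "start", "process": "start", "file": "change"}.get(cat, "info")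
--     return [cat], [typ]
-- ===== Notes on version B (the rewrite author's own statement) =====
-- stated objective: alternative
-- what changed: Replaces the five-branch first-match if/elif cascade with a single flat pass over a keyword->(priority,category) index keeping the minimum-priority matching keyword, then derives the type from the winning category; correct because every keyword belongs to exactly one group, so the minimum priority among matches equals the first matching branch.
import Mathlib
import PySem

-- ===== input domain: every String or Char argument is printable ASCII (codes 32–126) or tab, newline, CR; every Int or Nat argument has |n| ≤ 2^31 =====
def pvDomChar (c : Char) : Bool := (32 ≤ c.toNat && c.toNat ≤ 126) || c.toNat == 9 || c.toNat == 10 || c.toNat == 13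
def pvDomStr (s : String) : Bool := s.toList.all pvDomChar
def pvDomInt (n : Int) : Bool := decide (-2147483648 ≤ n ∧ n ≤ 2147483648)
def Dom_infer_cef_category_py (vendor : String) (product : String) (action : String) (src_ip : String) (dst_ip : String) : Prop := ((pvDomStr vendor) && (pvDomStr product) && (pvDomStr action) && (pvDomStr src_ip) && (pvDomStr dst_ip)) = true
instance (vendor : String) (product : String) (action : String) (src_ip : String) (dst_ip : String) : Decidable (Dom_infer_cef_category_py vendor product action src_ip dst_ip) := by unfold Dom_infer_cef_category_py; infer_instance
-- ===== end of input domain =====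

-- B replaces A's five-branch first-match if/elif cascade with one flat pass over a
-- keyword -> (priority, category) index keeping the minimum-priority match, then maps
-- category to type; same return value (objective: alternative).


-- ===== PORT A =====
-- Literal transliteration of the if/elif cascade; 'k in combined' is PySem.Str.isIn,
-- 'src_ip or dst_ip' truthiness is src_ip/dst_ip being nonempty.
def infer_cef_category_py (vendor : String) (product : String) (action : String) (src_ip : String) (dst_ip : String) : List String × List String :=
  let combined := PySem.Str.lower (PySem.Str.join " " [vendor, product, action])
  if (["firewall", "fw", "network", "traffic", "connection", "flow", "netflow"] : List String).any
      (fun k => PySem.Str.isIn k combined) then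
    (["network"], if (!(src_ip == "") || !(dst_ip == "")) then ["connection"] else ["info"])
  else if (["login", "logon", "auth", "password", "credential", "session"] : List String).any
      (fun k => PySem.Str.isIn k combined) then
    (["authentication"], ["start"])
  else if (["process", "execut", "spawn", "cmd", "command", "powershell", "script"] : List String).any
      (fun k => PySem.Str.isIn k combined) then
    (["process"], ["start"])
  else if (["file", "document", "upload", "download", "write", "delete", "creat"] : List String).any
      (fun k => PySem.Str.isIn k combined) then
    (["file"], ["change"])
  else if (["malware", "virus", "threat", "detect", "intrusion", "exploit", "attack"] : List String).any
      (fun k => PySem.Str.isIn k combined) then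
    (["intrusion_detection"], ["info"])
  else
    ((if (!(src_ip == "") || !(dst_ip == "")) then ["network"] else ["process"]), ["info"])

-- ===== PORT B =====
-- Source B's module-level _KW dict: keyword -> (priority, category), in insertion order
def pvKw : List (String × Nat × String) :=
  (["firewall", "fw", "network", "traffic", "connection", "flow", "netflow"].map (fun k => (k, 0, "network"))) ++
  (["login", "logon", "auth", "password", "credential", "session"].map (fun k => (k, 1, "authentication"))) ++
  (["process", "execut", "spawn", "cmd", "command", "powershell", "script"].map (fun k => (k, 2, "process"))) ++
  (["file", "document", "upload", "download", "write", "delete", "creat"].map (fun k => (k, 3, "file"))) ++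
  (["malware", "virus", "threat", "detect", "intrusion", "exploit", "attack"].map (fun k => (k, 4, "intrusion_detection")))

-- body of Source B's 'for k, (pri, cat) in _KW.items(): if k in combined and (best is None or pri < best[0]): best = ...'
def pvStep (m : String → Bool) (best : Option (Nat × String)) (e : String × Nat × String) : Option (Nat × String) :=
  if m e.1 && (match best with | none => true | some (q, _) => e.2.1 < q) then some e.2 else best

def infer_cef_category_py_alt (vendor : String) (product : String) (action : String) (src_ip : String) (dst_ip : String) : List String × List String :=
  let combined := PySem.Str.lower (PySem.Str.join " " [vendor, product, action])
  let hasIp := !(src_ip == "") || !(dst_ip == "")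
  match pvKw.foldl (pvStep (fun k => PySem.Str.isIn k combined)) none with
  | none => ((if hasIp then ["network"] else ["process"]), ["info"])
  | some (_, cat) =>
    ([cat],
     [if cat == "network" then (if hasIp then "connection" else "info")
      else (PySem.Dict.ofList [("authentication", "start"), ("process", "start"), ("file", "change")]).getD cat "info"])

-- ===== PRECONDITION & SPEC =====
def Spec_infer_cef_category_py (vendor : String) (product : String) (action : String) (src_ip : String) (dst_ip : String) (out : List String × List String) : Prop := out = infer_cef_category_py_alt vendor product action src_ip dst_ip
instance (vendor : String) (product : String) (action : String) (src_ip : String) (dst_ip : String) (out : List String × List String) : Decidable (Spec_infer_cef_category_py vendor product action src_ip dst_ip out) := by unfold Spec_infer_cef_category_py; infer_instance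

-- ===== CLAIM (what is proved, stated in full; the proofs are below) =====
def Claim_equal_infer_cef_category_py : Prop := ∀ (vendor : String) (product : String) (action : String) (src_ip : String) (dst_ip : String), Dom_infer_cef_category_py vendor product action src_ip dst_ip → Spec_infer_cef_category_py vendor product action src_ip dst_ip (infer_cef_category_py vendor product action src_ip dst_ip)

-- ===== LEMMAS AND PROOFS =====

-- Folding pvStep over a group whose entries all carry the same (p, c): the accumulator is
-- replaced by (p, c) iff some keyword of the group matches and (p, c) beats the accumulator.
theorem pvStep_const_group (m : String → Bool) (p : Nat) (c : String) (ks : List String) (b : Option (Nat × String)) :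
    (ks.map (fun k => (k, p, c))).foldl (pvStep m) b
    = if ks.any m && (match b with | none => true | some (q, _) => p < q) then some (p, c) else b := by
  induction ks generalizing b with
  | nil => simp
  | cons k rest ih =>
    simp only [List.map, List.foldl, List.any_cons, pvStep]
    by_cases hm : m k = true
    · by_cases hb : (match b with | none => true | some (q, _) => decide (p < q)) = true
      · simp [hm, hb, ih]
      · simp [hm, hb, ih]
    · simp [hm, ih]

-- Full evaluation of Source B's loop over _KW: the minimum-priority match is the first group
-- (in priority order) containing a matching keyword.
theorem pvKw_foldl (m : String → Bool) :
    pvKw.foldl (pvStep m) none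
    = if (["firewall", "fw", "network", "traffic", "connection", "flow", "netflow"] : List String).any m then some (0, "network")
      else if (["login", "logon", "auth", "password", "credential", "session"] : List String).any m then some (1, "authentication")
      else if (["process", "execut", "spawn", "cmd", "command", "powershell", "script"] : List String).any m then some (2, "process")
      else if (["file", "document", "upload", "download", "write", "delete", "creat"] : List String).any m then some (3, "file")
      else if (["malware", "virus", "threat", "detect", "intrusion", "exploit", "attack"] : List String).any m then some (4, "intrusion_detection")
      else none := by
  simp only [pvKw, List.foldl_append, pvStep_const_group]
  by_cases h0 : (["firewall", "fw", "network", "traffic", "connection", "flow", "netflow"] : List String).any m = true <;>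
  by_cases h1 : (["login", "logon", "auth", "password", "credential", "session"] : List String).any m = true <;>
  by_cases h2 : (["process", "execut", "spawn", "cmd", "command", "powershell", "script"] : List String).any m = true <;>
  by_cases h3 : (["file", "document", "upload", "download", "write", "delete", "creat"] : List String).any m = true <;>
  by_cases h4 : (["malware", "virus", "threat", "detect", "intrusion", "exploit", "attack"] : List String).any m = true <;>
  simp [h0, h1, h2, h3, h4]

-- ===== VERDICT (by name: the statement is the Claim_ definition above) =====
set_option maxHeartbeats 1000000 in
theorem infer_cef_category_py_spec : Claim_equal_infer_cef_category_py := by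
  intro vendor product action src_ip dst_ip _
  unfold Spec_infer_cef_category_py infer_cef_category_py infer_cef_category_py_alt
  simp only [pvKw_foldl]
  split_ifs <;> rfl
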